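-- pv_equiv track=rewrite | github.com/Dfreferecnceid/dadyy | main.py | is_bot_command
-- ===== SOURCE A (Python) =====
-- BOT_COMMANDS = [
--     # Start and basic commands
--     "start", "register", "cmds", "info", "redeem", "buy",
--
--     # Tool commands
--     "fake", "gen", "gate", "bin", "sk", "setpx", "delpx", "getpx",
--
--     # Admin commands
--     "gc", "plans", "plan", "looser", "broad", "notused", "off", "on",
--     "banbin", "unbanbin", "ban", "unban", "add", "rmv", "plus", "pro",
--     "elite", "vip", "ultimate",
--
--     # Gate commands
--     "au", "chk", "bu", "ad",  # Auth
--     "xx", "xo", "xs", "xc", "xp", "bt", "sh", "slf",  # Charge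
--     "mau", "mchk", "mxc", "mxp", "mxx"  # Mass
-- ]
--
-- def is_bot_command(message_text: str) -> bool:
--     """Check if message contains any bot command"""
--     if not message_text:
--         return False
--
--     text_lower = message_text.strip().lower()
--
--     for command in BOT_COMMANDS:
--         if text_lower.startswith(f'/{command}') or text_lower.startswith(f'.{command}') or text_lower.startswith(f'${command}'):
--             return True
--         if f' /{command}' in text_lower or f' .{command}' in text_lower or f' ${command}' in text_lower:
--             return True
--         if text_lower.startswith(f'/{command} ') or text_lower.startswith(f'.{command} ') or text_lower.startswith(f'${command} '):
--             return True
--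
--     return False
-- ===== SOURCE B (Python) =====
-- BOT_COMMANDS = [
--     # Start and basic commands
--     "start", "register", "cmds", "info", "redeem", "buy",
--
--     # Tool commands
--     "fake", "gen", "gate", "bin", "sk", "setpx", "delpx", "getpx",
--
--     # Admin commands
--     "gc", "plans", "plan", "looser", "broad", "notused", "off", "on",
--     "banbin", "unbanbin", "ban", "unban", "add", "rmv", "plus", "pro",
--     "elite", "vip", "ultimate",
--
--     # Gate commands
--     "au", "chk", "bu", "ad",  # Auth
--     "xx", "xo", "xs", "xc", "xp", "bt", "sh", "slf",  # Charge
--     "mau", "mchk", "mxc", "mxp", "mxx"  # Mass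
-- ]
--
--
-- def is_bot_command(message_text: str) -> bool:
--     """Check if message contains any bot command (single left-to-right position scan)."""
--     if not message_text:
--         return False
--
--     t = message_text.strip().lower()
--
--     # Scan positions once: a command hit is a '/', '.' or '$' at the start of the
--     # text or right after a space, followed by some command as a prefix.
--     for i in range(len(t)):
--         ch = t[i]
--         if ch in ('/', '.', '$') and (i == 0 or t[i - 1] == ' '):
--             rest = t[i + 1:]
--             for command in BOT_COMMANDS:
--                 if rest.startswith(command):
--                     return True
--     return False
-- ===== Notes on version B (the rewrite author's own statement) =====
-- stated objective: alternative
-- what changed: Replaces A's per-command loop of startswith and substring-containment checks by a single left-to-right scan over character positions that tests, at each command-prefix character found at the start of the text or right after a space, whether some command is a prefix of the rest.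
import Mathlib
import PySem

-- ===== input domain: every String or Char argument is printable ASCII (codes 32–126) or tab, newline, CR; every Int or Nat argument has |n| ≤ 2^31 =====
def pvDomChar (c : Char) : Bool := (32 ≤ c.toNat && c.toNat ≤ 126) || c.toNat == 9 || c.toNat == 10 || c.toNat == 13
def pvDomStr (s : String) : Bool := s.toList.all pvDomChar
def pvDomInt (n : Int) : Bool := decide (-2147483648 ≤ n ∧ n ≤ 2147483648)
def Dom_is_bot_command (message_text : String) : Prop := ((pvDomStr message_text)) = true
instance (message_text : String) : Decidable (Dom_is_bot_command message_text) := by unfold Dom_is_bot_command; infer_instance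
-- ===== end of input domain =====

-- B replaces A's per-command startswith/substring loop by a single left-to-right
-- scan over positions (prefix char at start or after a space, then command-prefix
-- check); objective: alternative traversal, same result proved equal.

def pvBotCommands : List String := [
  "start", "register", "cmds", "info", "redeem", "buy",
  "fake", "gen", "gate", "bin", "sk", "setpx", "delpx", "getpx",
  "gc", "plans", "plan", "looser", "broad", "notused", "off", "on",
  "banbin", "unbanbin", "ban", "unban", "add", "rmv", "plus", "pro",
  "elite", "vip", "ultimate",
  "au", "chk", "bu", "ad",
  "xx", "xo", "xs", "xc", "xp", "bt", "sh", "slf",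
  "mau", "mchk", "mxc", "mxp", "mxx"]

-- ===== PORT A =====
def is_bot_command (message_text : String) : Bool :=
  if message_text.toList = [] then false
  else
    let t := PySem.Chars.lower (PySem.Chars.strip message_text.toList)
    pvBotCommands.any (fun command =>
      let c := command.toList
      (PySem.Chars.startswith t ('/' :: c) || PySem.Chars.startswith t ('.' :: c) ||
        PySem.Chars.startswith t ('$' :: c))
      || (PySem.Chars.isIn (' ' :: '/' :: c) t || PySem.Chars.isIn (' ' :: '.' :: c) t ||
        PySem.Chars.isIn (' ' :: '$' :: c) t)
      || (PySem.Chars.startswith t ('/' :: c ++ [' ']) || PySem.Chars.startswith t ('.' :: c ++ [' ']) ||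
        PySem.Chars.startswith t ('$' :: c ++ [' '])))

-- ===== PORT B =====
def is_bot_command_alt (message_text : String) : Bool :=
  if message_text.toList = [] then false
  else
    let t := PySem.Chars.lower (PySem.Chars.strip message_text.toList)
    (List.range t.length).any (fun i =>
      match t[i]? with
      | some ch =>
        (ch == '/' || ch == '.' || ch == '$')
        && (i == 0 || t[i-1]? == some ' ')
        && pvBotCommands.any (fun command => PySem.Chars.startswith (t.drop (i+1)) command.toList)
      | none => false)

-- ===== PRECONDITION & SPEC =====
def Spec_is_bot_command (message_text : String) (out : Bool) : Prop := out = is_bot_command_alt message_text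
instance (message_text : String) (out : Bool) : Decidable (Spec_is_bot_command message_text out) := by unfold Spec_is_bot_command; infer_instance

-- ===== CLAIM (what is proved, stated in full; the proofs are below) =====
def Claim_equal_is_bot_command : Prop := ∀ (message_text : String), Dom_is_bot_command message_text → Spec_is_bot_command message_text (is_bot_command message_text)

-- ===== LEMMAS AND PROOFS =====

theorem consPrefixDrop (t : List Char) (j : Nat) (a : Char) (l : List Char) :
    (a :: l) <+: t.drop j ↔ t[j]? = some a ∧ l <+: t.drop (j+1) := by
  rw [List.cons_prefix_iff]
  constructor
  · rintro ⟨tl, heq, hpre⟩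
    refine ⟨?_, ?_⟩
    · have h : (t.drop j).head? = some a := by rw [heq]; rfl
      rwa [List.head?_drop] at h
    · have h : (t.drop j).tail = tl := by rw [heq]; rfl
      rw [← List.tail_drop, h]; exact hpre
  · rintro ⟨hget, hpre⟩
    refine ⟨t.drop (j+1), ?_, hpre⟩
    have h1 : (t.drop j).head? = some a := by rwa [List.head?_drop]
    have h2 : (t.drop j).tail = t.drop (j+1) := List.tail_drop ..
    cases h : t.drop j with
    | nil => rw [h] at h1; simp at h1
    | cons x xs =>
      rw [h] at h1 h2; simp at h1; simp at h2; rw [h1, h2]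

theorem pvScan_eq (t : List Char) (cmds : List String) :
    (cmds.any (fun command =>
      let c := command.toList
      (PySem.Chars.startswith t ('/' :: c) || PySem.Chars.startswith t ('.' :: c) ||
        PySem.Chars.startswith t ('$' :: c))
      || (PySem.Chars.isIn (' ' :: '/' :: c) t || PySem.Chars.isIn (' ' :: '.' :: c) t ||
        PySem.Chars.isIn (' ' :: '$' :: c) t)
      || (PySem.Chars.startswith t ('/' :: c ++ [' ']) || PySem.Chars.startswith t ('.' :: c ++ [' ']) ||
        PySem.Chars.startswith t ('$' :: c ++ [' '])))) =
    ((List.range t.length).any (fun i =>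
      match t[i]? with
      | some ch =>
        (ch == '/' || ch == '.' || ch == '$')
        && (i == 0 || t[i-1]? == some ' ')
        && cmds.any (fun command => PySem.Chars.startswith (t.drop (i+1)) command.toList)
      | none => false)) := by
  rw [Bool.eq_iff_iff]
  constructor
  · intro hA
    rw [List.any_eq_true] at hA
    obtain ⟨command, hmem, hbody⟩ := hA
    simp only [Bool.or_eq_true, PySem.Chars.startswith_iff] at hbody
    have close : ∀ (i : Nat) (p : Char), (p = '/' ∨ p = '.' ∨ p = '$') →
        t[i]? = some p → (i = 0 ∨ t[i-1]? = some ' ') →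
        command.toList <+: t.drop (i+1) →
        (List.range t.length).any (fun i =>
          match t[i]? with
          | some ch =>
            (ch == '/' || ch == '.' || ch == '$')
            && (i == 0 || t[i-1]? == some ' ')
            && cmds.any (fun command => PySem.Chars.startswith (t.drop (i+1)) command.toList)
          | none => false) = true := by
      intro i p hp hget hel hpre
      rw [List.any_eq_true]
      refine ⟨i, List.mem_range.mpr (List.getElem?_eq_some_iff.mp hget).1, ?_⟩
      rw [hget]
      simp only [Bool.and_eq_true, Bool.or_eq_true, beq_iff_eq]
      refine ⟨⟨by tauto, hel⟩, ?_⟩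
      rw [List.any_eq_true]
      exact ⟨command, hmem, (PySem.Chars.startswith_iff _ _).mpr hpre⟩
    have fromStart : ∀ (p : Char), (p = '/' ∨ p = '.' ∨ p = '$') →
        (p :: command.toList) <+: t →
        ((List.range t.length).any (fun i =>
          match t[i]? with
          | some ch =>
            (ch == '/' || ch == '.' || ch == '$')
            && (i == 0 || t[i-1]? == some ' ')
            && cmds.any (fun command => PySem.Chars.startswith (t.drop (i+1)) command.toList)
          | none => false) = true) := fun p hp hpre => by
      have h := (consPrefixDrop t 0 p command.toList).mp (by simpa using hpre)
      exact close 0 p hp h.1 (Or.inl rfl) h.2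
    have fromIn : ∀ (p : Char), (p = '/' ∨ p = '.' ∨ p = '$') →
        PySem.Chars.isIn (' ' :: p :: command.toList) t = true →
        ((List.range t.length).any (fun i =>
          match t[i]? with
          | some ch =>
            (ch == '/' || ch == '.' || ch == '$')
            && (i == 0 || t[i-1]? == some ' ')
            && cmds.any (fun command => PySem.Chars.startswith (t.drop (i+1)) command.toList)
          | none => false) = true) := fun p hp hIn => by
      obtain ⟨j, hj⟩ := (PySem.Chars.exists_prefix_drop_iff_isIn _ _).mpr hIn
      obtain ⟨hsp, hrest⟩ := (consPrefixDrop t j ' ' _).mp hj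
      obtain ⟨hpc, hc⟩ := (consPrefixDrop t (j+1) p _).mp hrest
      exact close (j+1) p hp hpc (Or.inr (by simpa using hsp)) hc
    have fromSpace : ∀ (p : Char), (p = '/' ∨ p = '.' ∨ p = '$') →
        (p :: (command.toList ++ [' '])) <+: t →
        ((List.range t.length).any (fun i =>
          match t[i]? with
          | some ch =>
            (ch == '/' || ch == '.' || ch == '$')
            && (i == 0 || t[i-1]? == some ' ')
            && cmds.any (fun command => PySem.Chars.startswith (t.drop (i+1)) command.toList)
          | none => false) = true) := fun p hp hpre => by
      have h := (consPrefixDrop t 0 p _).mp (by simpa using hpre)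
      exact close 0 p hp h.1 (Or.inl rfl)
        ((List.prefix_append command.toList [' ']).trans h.2)
    rcases hbody with (((h | h) | h) | ((h | h) | h)) | ((h | h) | h)
    · exact fromStart '/' (by tauto) h
    · exact fromStart '.' (by tauto) h
    · exact fromStart '$' (by tauto) h
    · exact fromIn '/' (by tauto) h
    · exact fromIn '.' (by tauto) h
    · exact fromIn '$' (by tauto) h
    · exact fromSpace '/' (by tauto) h
    · exact fromSpace '.' (by tauto) h
    · exact fromSpace '$' (by tauto) h
  · intro hB
    rw [List.any_eq_true] at hB
    obtain ⟨i, hi, hbody⟩ := hB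
    have hlt := List.mem_range.mp hi
    have hget : t[i]? = some t[i] := List.getElem?_eq_getElem hlt
    rw [hget] at hbody
    simp only [Bool.and_eq_true, Bool.or_eq_true, beq_iff_eq, List.any_eq_true,
      PySem.Chars.startswith_iff] at hbody
    obtain ⟨⟨hch, hel⟩, command, hmem, hpre⟩ := hbody
    rw [List.any_eq_true]
    refine ⟨command, hmem, ?_⟩
    simp only [Bool.or_eq_true, PySem.Chars.startswith_iff]
    by_cases h0 : i = 0
    · subst h0
      have hfull : (t[0] :: command.toList) <+: t := by
        have := (consPrefixDrop t 0 (t[0]) command.toList).mpr ⟨hget, hpre⟩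
        simpa using this
      rcases hch with (h | h) | h <;> rw [h] at hfull <;> tauto
    · have hsp : t[i-1]? = some ' ' := by
        rcases hel with h | h
        · omega
        · exact h
      have hmid : (t[i] :: command.toList) <+: t.drop i :=
        (consPrefixDrop t i _ _).mpr ⟨hget, hpre⟩
      have hfull : (' ' :: t[i] :: command.toList) <+: t.drop (i-1) :=
        (consPrefixDrop t (i-1) ' ' _).mpr ⟨hsp, by rw [show i-1+1 = i by omega]; exact hmid⟩
      have hin : PySem.Chars.isIn (' ' :: t[i] :: command.toList) t = true :=
        (PySem.Chars.exists_prefix_drop_iff_isIn _ _).mp ⟨i-1, hfull⟩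
      rcases hch with (h | h) | h <;> rw [h] at hin <;> tauto

-- ===== VERDICT (by name: the statement is the Claim_ definition above) =====
theorem is_bot_command_spec : Claim_equal_is_bot_command := by
  intro s _
  unfold Spec_is_bot_command is_bot_command is_bot_command_alt
  by_cases h : s.toList = []
  · simp [h]
  · simp only [h, if_false]
    exact pvScan_eq _ _
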